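-- pv_equiv track=rewrite | github.com/qwetboy10/DumbTextTool | tests/nth_letter_line_mod.py | solve_verbose
-- ===== SOURCE A (Python) =====
-- def solve_verbose(text):
--     words = text.strip().split('\n')
--     words = list(filter(lambda line: len(line) > 0, words))
--     min_len = max(map(lambda w: len(w),words))
--     ret = []
--     for i in range(1,min_len):
--         ret.append(''.join(map(lambda w: w[i % len(w)], words)))
--     return ret
-- ===== SOURCE B (Python) =====
-- def solve_verbose(text):
--     lines = [l for l in text.strip().split('\n') if l]
--     max_len = max(map(len, lines))
--     grid = [(l * (max_len // len(l) + 1))[:max_len] for l in lines]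
--     return [''.join(col) for col in zip(*grid)][1:]
-- ===== Notes on version B (the rewrite author's own statement) =====
-- stated objective: faster
-- what changed: Instead of A's per-index loop that joins w[i % len(w)] one character at a time, B cyclically pads every line once with string multiplication, transposes the grid with zip(*grid), joins the columns and drops column 0; the per-character Python-level lambda/mod work disappears into C-level str*,zip,join.
import Mathlib
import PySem

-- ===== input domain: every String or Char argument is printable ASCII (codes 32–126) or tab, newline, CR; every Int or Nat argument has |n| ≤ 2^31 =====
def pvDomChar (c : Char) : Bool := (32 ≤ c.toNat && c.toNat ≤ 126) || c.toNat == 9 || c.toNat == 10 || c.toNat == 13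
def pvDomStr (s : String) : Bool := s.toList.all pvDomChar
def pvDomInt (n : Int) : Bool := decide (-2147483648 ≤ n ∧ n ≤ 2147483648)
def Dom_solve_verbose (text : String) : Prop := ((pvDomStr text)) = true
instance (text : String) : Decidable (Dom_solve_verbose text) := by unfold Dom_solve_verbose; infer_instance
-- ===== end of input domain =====

-- B pads each line cyclically once and transposes with zip(*grid) instead of A's per-index character joins (measured constant-factor faster).

-- ===== PORT A =====
def solve_verbose (text : String) : List String :=
  let words := (PySem.Chars.splitOn (PySem.Chars.strip text.toList) ['\n']).map String.ofList
  let words := words.filter (fun line => PySem.Str.len line > 0)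
  match PySem.List.max? (words.map (fun w => PySem.Str.len w)) (fun x => x) with
  | none => []   -- Python: max() raises ValueError here; excluded by Pre_solve_verbose
  | some min_len =>
      (PySem.List.pyRange 1 min_len).foldl (fun ret i =>
        ret ++ [PySem.Str.join "" (words.map (fun w =>
          match PySem.Str.pyGet? w (PySem.Int.mod i (PySem.Str.len w)) with
          | some c => String.ofList [c]
          | none => ""))]) []   -- none is unreachable: 0 ≤ i % len w < len w

-- ===== PORT B =====
-- zip(*rows): take heads while every row is nonempty
def pyZipStar {α : Type} [Inhabited α] (rows : List (List α)) : List (List α) :=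
  if h : rows ≠ [] ∧ ∀ r ∈ rows, r ≠ [] then
    rows.map (fun r => r.headI) :: pyZipStar (rows.map (fun r => r.tail))
  else []
termination_by rows.headI.length
decreasing_by
  obtain ⟨h1, h2⟩ := h
  cases rows with
  | nil => exact absurd rfl h1
  | cons r rs =>
    have hr : r ≠ [] := h2 r (by simp)
    cases r with
    | nil => exact absurd rfl hr
    | cons a as => simp [List.headI]

def solve_verbose_alt (text : String) : List String :=
  let lines := ((PySem.Chars.splitOn (PySem.Chars.strip text.toList) ['\n']).map String.ofList).filter
    (fun l => PySem.Str.len l > 0)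
  match PySem.List.max? (lines.map (fun l => PySem.Str.len l)) (fun x => x) with
  | none => []   -- Python: max() raises ValueError here; excluded by Pre_solve_verbose
  | some max_len =>
      let grid := lines.map (fun l =>
        PySem.List.slice (PySem.List.pyRepeat l.toList (PySem.Int.floordiv max_len (PySem.Str.len l) + 1))
          none (some max_len))
      PySem.List.slice ((pyZipStar grid).map (fun col => String.ofList col)) (some 1) none

-- ===== PRECONDITION & SPEC =====
-- Pre_ excludes exactly the inputs where Python A raises ValueError (max() of no lines): all-whitespace text.
def Pre_solve_verbose (text : String) : Prop := PySem.Str.strip text ≠ ""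
instance (text : String) : Decidable (Pre_solve_verbose text) := by unfold Pre_solve_verbose; infer_instance
def pvWitness_solve_verbose : String := "ab\ncde"

def Spec_solve_verbose (text : String) (out : List String) : Prop := out = solve_verbose_alt text
instance (text : String) (out : List String) : Decidable (Spec_solve_verbose text out) := by unfold Spec_solve_verbose; infer_instance

-- ===== CLAIM (what is proved, stated in full; the proofs are below) =====
def Claim_equal_solve_verbose : Prop := ∀ (text : String), Dom_solve_verbose text → Pre_solve_verbose text → Spec_solve_verbose text (solve_verbose text)

-- ===== LEMMAS AND PROOFS =====

lemma flatten_replicate_getD {α : Type} (d : α) (w : List α) (k i : Nat)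
    (h : i < k * w.length) :
    (List.replicate k w).flatten.getD i d = w.getD (i % w.length) d := by
  induction k generalizing i with
  | zero => omega
  | succ k ih =>
    have hrep : (List.replicate (k+1) w).flatten = w ++ (List.replicate k w).flatten := by
      simp [List.replicate_succ]
    rw [hrep]
    by_cases hi : i < w.length
    · rw [List.getD_append _ _ _ _ hi, Nat.mod_eq_of_lt hi]
    · have hi' : w.length ≤ i := Nat.le_of_not_lt hi
      rw [List.getD_append_right _ _ _ _ hi', Nat.mod_eq_sub_mod hi']
      exact ih (i - w.length) (by rw [Nat.succ_mul] at h; omega)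

lemma pyZipStar_uniform {α : Type} [Inhabited α] (n : Nat) (rows : List (List α))
    (hne : rows ≠ []) (hlen : ∀ r ∈ rows, r.length = n) :
    pyZipStar rows = (List.range n).map (fun i => rows.map (fun r => r.getD i default)) := by
  induction n generalizing rows with
  | zero =>
    rw [pyZipStar]
    have h0 : ¬ (rows ≠ [] ∧ ∀ r ∈ rows, r ≠ []) := by
      rintro ⟨-, h2⟩
      obtain ⟨r, hr⟩ := List.exists_mem_of_ne_nil rows hne
      exact h2 r hr (List.eq_nil_of_length_eq_zero (hlen r hr))
    simp [h0]
  | succ n ih =>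
    have hner : ∀ r ∈ rows, r ≠ [] := by
      intro r hr
      exact List.ne_nil_of_length_pos (by rw [hlen r hr]; omega)
    rw [pyZipStar, dif_pos ⟨hne, hner⟩]
    rw [ih (rows.map (fun r => r.tail)) (by simpa using hne)
      (by intro r hr; obtain ⟨s, hs, rfl⟩ := List.mem_map.mp hr
          have := hlen s hs; simp [List.length_tail]; omega)]
    rw [List.range_succ_eq_map]
    simp only [List.map_cons, List.map_map]
    refine congrArg₂ _ ?_ ?_
    · exact List.map_congr_left (fun r hr => by
        obtain ⟨a, as, rfl⟩ := List.exists_cons_of_ne_nil (hner r hr); rfl)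
    · refine List.map_congr_left (fun i _ => ?_)
      simp only [List.map_map, Function.comp]
      exact List.map_congr_left (fun r hr => by
        obtain ⟨a, as, rfl⟩ := List.exists_cons_of_ne_nil (hner r hr); rfl)

-- the padded row: length exactly M, entry i is w[i % len w]
lemma pad_getD (w : List Char) (M i : Nat) (hw : 0 < w.length) (hi : i < M) :
    (PySem.List.slice (PySem.List.pyRepeat w (PySem.Int.floordiv (M : Int) (w.length : Int) + 1))
      none (some (M : Int))).getD i default = w.getD (i % w.length) default := by
  have hMlt : M < (M / w.length + 1) * w.length := by
    have := Nat.div_add_mod M w.length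
    have hmod : M % w.length < w.length := Nat.mod_lt _ hw
    calc M = w.length * (M / w.length) + M % w.length := (Nat.div_add_mod M w.length).symm
      _ < w.length * (M / w.length) + w.length := by omega
      _ = (M / w.length + 1) * w.length := by ring
  rw [PySem.Int.floordiv_natCast]
  have hcast : ((M / w.length : Nat) : Int) + 1 = ((M / w.length + 1 : Nat) : Int) := by push_cast; ring
  rw [hcast]
  rw [PySem.List.slice_to_natCast]
  unfold PySem.List.pyRepeat
  rw [Int.toNat_natCast]
  have hgetD : (List.take M (List.replicate (M / w.length + 1) w).flatten).getD i default
      = ((List.replicate (M / w.length + 1) w).flatten).getD i default := by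
    simp only [List.getD, List.getElem?_take_of_lt hi]
  rw [hgetD]
  exact flatten_replicate_getD _ _ _ _ (lt_of_lt_of_le hi (le_of_lt hMlt))

lemma pad_length (w : List Char) (M : Nat) (hw : 0 < w.length) :
    (PySem.List.slice (PySem.List.pyRepeat w (PySem.Int.floordiv (M : Int) (w.length : Int) + 1))
      none (some (M : Int))).length = M := by
  have hMle : M ≤ (M / w.length + 1) * w.length := by
    have := Nat.div_add_mod M w.length
    have hmod : M % w.length < w.length := Nat.mod_lt _ hw
    calc M = w.length * (M / w.length) + M % w.length := (Nat.div_add_mod M w.length).symm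
      _ ≤ w.length * (M / w.length) + w.length := by omega
      _ = (M / w.length + 1) * w.length := by ring
  rw [PySem.Int.floordiv_natCast]
  have hcast : ((M / w.length : Nat) : Int) + 1 = ((M / w.length + 1 : Nat) : Int) := by push_cast; ring
  rw [hcast, PySem.List.slice_to_natCast]
  unfold PySem.List.pyRepeat
  rw [Int.toNat_natCast]
  rw [List.length_take, List.length_flatten]
  simp only [List.map_replicate, List.sum_replicate, smul_eq_mul]
  omega

-- ===== VERDICT (by name: the statement is the Claim_ definition above) =====
theorem solve_verbose_spec : Claim_equal_solve_verbose := by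
  intro text _ _
  unfold Spec_solve_verbose solve_verbose solve_verbose_alt
  simp only []
  set ws := ((PySem.Chars.splitOn (PySem.Chars.strip text.toList) ['\n']).map String.ofList).filter
    (fun l => PySem.Str.len l > 0) with hws
  cases hmax : PySem.List.max? (ws.map (fun w => PySem.Str.len w)) (fun x => x) with
  | none => rfl
  | some m =>
      simp only []
      have hws_ne : ws ≠ [] := by
        intro h
        rw [h] at hmax
        simp [PySem.List.max?] at hmax
      have hlen_pos : ∀ w ∈ ws, 0 < w.toList.length := by
        intro w hw
        have h := List.of_mem_filter hw
        simp only [PySem.Str.len, decide_eq_true_eq, gt_iff_lt] at h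
        exact_mod_cast h
      obtain ⟨w0, hw0, hw0m⟩ := List.mem_map.mp (PySem.List.max?_mem hmax)
      have hm1 : 1 ≤ m := by
        have := hlen_pos w0 hw0
        have : PySem.Str.len w0 = (w0.toList.length : Int) := rfl
        omega
      set M := m.toNat with hM
      have hmM : (M : Int) = m := Int.toNat_of_nonneg (by omega)
      -- A side: foldl → map over the tail of range M
      rw [PySem.List.foldl_append_singleton_eq_map, List.nil_append]
      have hrange : PySem.List.pyRange 1 m = ((List.range M).map (fun k : Nat => (k : Int))).tail := by
        have h0 : PySem.List.pyRange 0 m = 0 :: PySem.List.pyRange 1 m :=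
          PySem.List.pyRange_one_cons (by omega)
        have h1 : PySem.List.pyRange 0 m = (List.range M).map (fun k : Nat => (k : Int)) := by
          rw [← hmM]
          exact PySem.List.pyRange_zero_natCast M
        rw [h1] at h0
        calc PySem.List.pyRange 1 m = ((0 : Int) :: PySem.List.pyRange 1 m).tail := rfl
          _ = ((List.range M).map (fun k : Nat => (k : Int))).tail := by rw [← h0]
      rw [hrange, ← List.map_tail, List.map_map]
      -- B side: transpose of the uniform grid
      have hrows_len : ∀ r ∈ ws.map (fun l =>
          PySem.List.slice (PySem.List.pyRepeat l.toList (PySem.Int.floordiv m (PySem.Str.len l) + 1))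
            none (some m)), r.length = M := by
        intro r hr
        obtain ⟨w, hw, rfl⟩ := List.mem_map.mp hr
        rw [← hmM]
        exact pad_length w.toList M (hlen_pos w hw)
      rw [pyZipStar_uniform M _ (by simpa using hws_ne) hrows_len]
      rw [PySem.List.slice_from_one, ← List.map_tail, ← List.map_tail, List.map_map]
      refine List.map_congr_left (fun i hi => ?_)
      have hiM : i < M := List.mem_range.mp (List.mem_of_mem_tail hi)
      simp only [Function.comp]
      -- pointwise: column i
      have hA : ∀ w ∈ ws,
          (match PySem.Str.pyGet? w (PySem.Int.mod (i : Int) (PySem.Str.len w)) with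
           | some c => String.ofList [c]
           | none => "") = String.ofList [w.toList.getD (i % w.toList.length) default] := by
        intro w hw
        have hL : 0 < w.toList.length := hlen_pos w hw
        have hmod : i % w.toList.length < w.toList.length := Nat.mod_lt _ hL
        have h1 : PySem.Str.len w = (w.toList.length : Int) := rfl
        rw [h1, PySem.Int.mod_natCast]
        have h2 : PySem.Str.pyGet? w ((i % w.toList.length : Nat) : Int)
            = w.toList[(i % w.toList.length)]? := by
          rw [PySem.Str.pyGet?, PySem.Chars.pyGet?_eq_listPyGet?, PySem.List.pyGet?_natCast]
        rw [h2, List.getElem?_eq_getElem hmod]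
        simp only [List.getD_eq_getElem?_getD, List.getElem?_eq_getElem hmod, Option.getD_some]
      rw [List.map_congr_left hA]
      -- join of singleton strings = ofList of the chars
      rw [PySem.Str.join]
      simp only [List.map_map, Function.comp_def, String.toList_ofList]
      have hjoin : PySem.Chars.join "".toList
            (ws.map (fun w => [w.toList.getD (i % w.toList.length) default]))
          = ws.map (fun w => w.toList.getD (i % w.toList.length) default) := by
        have : ws.map (fun w => [w.toList.getD (i % w.toList.length) default])
            = List.map (fun c => [c]) (ws.map (fun w => w.toList.getD (i % w.toList.length) default)) := by
          rw [List.map_map]; rfl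
        rw [this]
        exact PySem.Chars.join_nil_singletons _
      rw [hjoin]
      -- B entry: read the grid cells
      refine congrArg String.ofList ?_
      refine (List.map_congr_left (fun w hw => ?_)).symm
      have h1 : PySem.Str.len w = (w.toList.length : Int) := rfl
      rw [h1, ← hmM]
      exact pad_getD w.toList M i (hlen_pos w hw) hiM
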